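-- pv_equiv track=rewrite | github.com/cikitraque13/sistemamaestro | backend/app/services/semantic_admission_decision.py | _pick_by_precedence
-- ===== SOURCE A (Python) =====
-- from typing import Any, Dict, Iterable, List, Optional, Sequence, Tuple
--
-- def _pick_by_precedence(
--     labels: Iterable[str],
--     precedence_order: Sequence[str],
-- ) -> Optional[str]:
--     """
--     Elige la primera etiqueta presente segun precedencia.
--     """
--     label_set = set(labels)
--     for label in precedence_order:
--         if label in label_set:
--             return label
--     return None
-- ===== SOURCE B (Python) =====
-- def _pick_by_precedence(labels, precedence_order):
--     """
--     Elige la primera etiqueta presente segun precedencia.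
--     Inverted decomposition: rank table over precedence_order, then one pass
--     over labels keeping the label with the smallest rank.
--     """
--     rank = {}
--     for i, lbl in enumerate(precedence_order):
--         rank.setdefault(lbl, i)
--     best = None
--     for lbl in labels:
--         r = rank.get(lbl)
--         if r is not None and (best is None or r < best[1]):
--             best = (lbl, r)
--     return best[0] if best is not None else None
-- ===== Notes on version B (the rewrite author's own statement) =====
-- stated objective: alternative
-- what changed: Inverts the traversal: instead of scanning precedence_order against a set of labels with an early return, B builds a first-occurrence rank dict over precedence_order and makes one pass over labels maintaining the label of minimum rank.
import Mathlib
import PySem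

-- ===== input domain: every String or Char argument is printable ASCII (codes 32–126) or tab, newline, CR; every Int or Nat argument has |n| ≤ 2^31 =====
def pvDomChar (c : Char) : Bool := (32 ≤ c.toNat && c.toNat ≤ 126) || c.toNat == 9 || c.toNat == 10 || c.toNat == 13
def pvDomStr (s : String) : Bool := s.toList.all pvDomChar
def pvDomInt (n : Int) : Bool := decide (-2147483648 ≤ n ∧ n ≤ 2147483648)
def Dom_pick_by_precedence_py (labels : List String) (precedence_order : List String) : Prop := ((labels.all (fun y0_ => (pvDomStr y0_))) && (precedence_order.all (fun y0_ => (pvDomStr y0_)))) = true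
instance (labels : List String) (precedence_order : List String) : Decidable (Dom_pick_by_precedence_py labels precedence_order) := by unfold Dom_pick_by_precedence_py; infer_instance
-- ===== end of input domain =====

-- B inverts the traversal: a first-occurrence rank dict over precedence_order, then one pass over labels keeping the minimum-rank label.


-- ===== PORT A =====
-- the 'for label in precedence_order: if label in label_set: return label' loop
def pickAGo (label_set : PySem.Set String) : List String → Option String
  | [] => none
  | l :: rest => if PySem.Set.contains label_set l then some l else pickAGo label_set rest

def pick_by_precedence_py (labels : List String) (precedence_order : List String) : Option String :=
  let label_set := PySem.Set.ofList labels
  pickAGo label_set precedence_order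

-- ===== PORT B =====
-- rank = {}; for i, lbl in enumerate(precedence_order): rank.setdefault(lbl, i)
def pickBRank (precedence_order : List String) : PySem.Dict String Int :=
  (PySem.List.enumerate precedence_order).foldl (fun d p => d.setdefault p.2 p.1) PySem.Dict.empty

-- loop body: r = rank.get(lbl); if r is not None and (best is None or r < best[1]): best = (lbl, r)
def pickBStep (rank : PySem.Dict String Int) (best : Option (String × Int)) (lbl : String) : Option (String × Int) :=
  match rank.get? lbl with
  | none => best
  | some r =>
    match best with
    | none => some (lbl, r)
    | some (b, br) => if r < br then some (lbl, r) else some (b, br)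

def pick_by_precedence_py_alt (labels : List String) (precedence_order : List String) : Option String :=
  let rank := pickBRank precedence_order
  (labels.foldl (pickBStep rank) none).map Prod.fst

-- ===== PRECONDITION & SPEC =====
def Spec_pick_by_precedence_py (labels : List String) (precedence_order : List String) (out : Option String) : Prop := out = pick_by_precedence_py_alt labels precedence_order
instance (labels : List String) (precedence_order : List String) (out : Option String) : Decidable (Spec_pick_by_precedence_py labels precedence_order out) := by unfold Spec_pick_by_precedence_py; infer_instance

-- ===== CLAIM (what is proved, stated in full; the proofs are below) =====
def Claim_equal_pick_by_precedence_py : Prop := ∀ (labels : List String) (precedence_order : List String), Dom_pick_by_precedence_py labels precedence_order → Spec_pick_by_precedence_py labels precedence_order (pick_by_precedence_py labels precedence_order)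

-- ===== LEMMAS AND PROOFS =====

lemma setdefault_eq (d : PySem.Dict String Int) (k : String) (v : Int) :
    d.setdefault k v = if d.contains k then d else d.insert k v := by
  by_cases h : d.contains k = true
  · simp [PySem.Dict.setdefault, h]
  · apply PySem.Dict.ext
    rw [if_neg h]
    simp [PySem.Dict.setdefault, h, PySem.Dict.items_insert_of_not_contains]

lemma contains_ofList_eq (labels : List String) (l : String) :
    PySem.Set.contains (PySem.Set.ofList labels) l = decide (l ∈ labels) := by
  by_cases h : l ∈ labels
  · simp [h, PySem.Set.contains_iff, PySem.Set.mem_ofList]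
  · simp [h, PySem.Set.contains_iff, PySem.Set.mem_ofList]

-- A equals the first precedence element that lies in labels
lemma pickA_eq_find (labels : List String) (po : List String) :
    pick_by_precedence_py labels po = po.find? (fun l => decide (l ∈ labels)) := by
  induction po with
  | nil => rfl
  | cons x xs ih =>
    show pickAGo (PySem.Set.ofList labels) (x :: xs) = _
    by_cases h : x ∈ labels
    · rw [List.find?_cons_of_pos (by simp [h])]
      simp [pickAGo, contains_ofList_eq, h]
    · rw [List.find?_cons_of_neg (by simp [h])]
      rw [pickAGo, contains_ofList_eq]
      simp only [h, decide_false, if_false]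
      simpa [pick_by_precedence_py] using ih

-- rank lookup = first index of l in precedence_order
lemma rank_go (po : List String) : ∀ (s : Int) (d : PySem.Dict String Int) (l : String),
    ((PySem.List.enumerate po s).foldl (fun d p => d.setdefault p.2 p.1) d).get? l =
      match d.get? l with
      | some v => some v
      | none => if l ∈ po then some (s + (po.idxOf l : Int)) else none := by
  induction po with
  | nil =>
    intro s d l
    simp [PySem.List.enumerate_nil]
    cases hd : d.get? l <;> simp
  | cons x xs ih =>
    intro s d l
    rw [PySem.List.enumerate_cons, List.foldl_cons, ih (s + 1) (d.setdefault x s) l]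
    rw [setdefault_eq]
    by_cases hc : d.contains x = true
    · rw [if_pos hc]
      cases hd : d.get? l with
      | some v => simp
      | none =>
        have hlx : l ≠ x := by
          intro he; subst he
          rw [PySem.Dict.get?_eq_none_iff_contains] at hd
          simp [hd] at hc
        have hxl : (x == l) = false := by simpa using Ne.symm hlx
        simp only [List.mem_cons, hlx, false_or, List.idxOf_cons, hxl, cond_false]
        by_cases hm : l ∈ xs
        · simp only [hm, if_true, Option.some.injEq]
          push_cast
          ring
        · simp [hm]
    · rw [if_neg hc]
      by_cases hlx : l = x
      · subst hlx
        rw [PySem.Dict.get?_insert_self]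
        have hd : d.get? l = none := by
          rw [PySem.Dict.get?_eq_none_iff_contains]
          simpa using hc
        simp [hd, List.idxOf_cons]
      · rw [PySem.Dict.get?_insert_of_ne _ _ hlx]
        cases hd : d.get? l with
        | some v => simp
        | none =>
          have hxl : (x == l) = false := by simpa using Ne.symm hlx
          simp only [List.mem_cons, hlx, false_or, List.idxOf_cons, hxl, cond_false]
          by_cases hm : l ∈ xs
          · simp only [hm, if_true, Option.some.injEq]
            push_cast
            ring
          · simp [hm]

lemma rank_get (po : List String) (l : String) :
    (pickBRank po).get? l = if l ∈ po then some ((po.idxOf l : Int)) else none := by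
  show ((PySem.List.enumerate po 0).foldl (fun d p => d.setdefault p.2 p.1) PySem.Dict.empty).get? l = _
  rw [rank_go po 0 PySem.Dict.empty l]
  simp [PySem.Dict.get?_empty]

-- the running-minimum state after processing `seen`
def GoodB (po : List String) (seen : List String) : Option (String × Int) → Prop
  | none => ∀ l ∈ seen, l ∉ po
  | some (b, r) => b ∈ seen ∧ b ∈ po ∧ r = (po.idxOf b : Int) ∧
      ∀ l ∈ seen, l ∈ po → po.idxOf b ≤ po.idxOf l

lemma pickBStep_eq (po : List String) (best : Option (String × Int)) (l : String) :
    pickBStep (pickBRank po) best l =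
      if l ∈ po then
        match best with
        | none => some (l, (po.idxOf l : Int))
        | some (b, br) => if (po.idxOf l : Int) < br then some (l, (po.idxOf l : Int)) else some (b, br)
      else best := by
  unfold pickBStep
  rw [rank_get]
  split_ifs with hl
  · cases best with
    | none => rfl
    | some p => rfl
  · rfl

lemma foldB_good (po : List String) : ∀ (ls seen : List String) (best : Option (String × Int)),
    GoodB po seen best → GoodB po (seen ++ ls) (ls.foldl (pickBStep (pickBRank po)) best) := by
  intro ls
  induction ls with
  | nil => intro seen best h; simpa using h
  | cons l ls ih =>
    intro seen best h
    have hstep : GoodB po (seen ++ [l]) (pickBStep (pickBRank po) best l) := by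
      rw [pickBStep_eq]
      by_cases hl : l ∈ po
      · rw [if_pos hl]
        cases best with
        | none =>
          have h' : ∀ m ∈ seen, m ∉ po := h
          show GoodB po (seen ++ [l]) (some (l, (po.idxOf l : Int)))
          refine ⟨by simp, hl, rfl, ?_⟩
          intro m hm hmpo
          rcases List.mem_append.mp hm with hm | hm
          · exact absurd hmpo (h' m hm)
          · simp at hm; subst hm; exact le_refl _
        | some p =>
          obtain ⟨b, br⟩ := p
          obtain ⟨hb, hbpo, hbr, hmin⟩ := h
          subst hbr
          show GoodB po (seen ++ [l])
            (if (po.idxOf l : Int) < (po.idxOf b : Int) then some (l, (po.idxOf l : Int))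
             else some (b, (po.idxOf b : Int)))
          split_ifs with hlt
          · refine ⟨by simp, hl, rfl, ?_⟩
            intro m hm hmpo
            rcases List.mem_append.mp hm with hm | hm
            · exact le_of_lt (lt_of_lt_of_le (by exact_mod_cast hlt) (hmin m hm hmpo))
            · simp at hm; subst hm; exact le_refl _
          · refine ⟨List.mem_append_left _ hb, hbpo, rfl, ?_⟩
            intro m hm hmpo
            rcases List.mem_append.mp hm with hm | hm
            · exact hmin m hm hmpo
            · simp at hm; subst hm
              exact_mod_cast not_lt.mp hlt
      · rw [if_neg hl]
        cases best with
        | none =>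
          have h' : ∀ m ∈ seen, m ∉ po := h
          show GoodB po (seen ++ [l]) none
          intro m hm
          rcases List.mem_append.mp hm with hm | hm
          · exact h' m hm
          · simp at hm; subst hm; exact hl
        | some p =>
          obtain ⟨b, br⟩ := p
          obtain ⟨hb, hbpo, hbr, hmin⟩ := h
          refine ⟨List.mem_append_left _ hb, hbpo, hbr, ?_⟩
          intro m hm hmpo
          rcases List.mem_append.mp hm with hm | hm
          · exact hmin m hm hmpo
          · simp at hm; subst hm; exact absurd hmpo hl
    have := ih (seen ++ [l]) (pickBStep (pickBRank po) best l) hstep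
    simpa [List.append_assoc] using this

lemma find_none (labels po : List String) (h : ∀ l ∈ labels, l ∉ po) :
    po.find? (fun l => decide (l ∈ labels)) = none := by
  rw [List.find?_eq_none]
  intro x hx
  simp only [decide_eq_true_eq]
  exact fun hxl => h x hxl hx

lemma find_of_min (labels : List String) : ∀ (po : List String) (b : String), b ∈ labels → b ∈ po →
    (∀ l ∈ labels, l ∈ po → po.idxOf b ≤ po.idxOf l) →
    po.find? (fun l => decide (l ∈ labels)) = some b := by
  intro po
  induction po with
  | nil => intro b _ hb; cases hb
  | cons x xs ih =>
    intro b hbl hbpo hmin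
    by_cases hx : x ∈ labels
    · rw [List.find?_cons_of_pos (by simp [hx])]
      have h0 : (x :: xs).idxOf b = 0 := by
        have := hmin x hx (by simp)
        simpa [List.idxOf_cons_self] using Nat.le_zero.mp (by simpa [List.idxOf_cons_self] using this)
      by_cases hbx : b = x
      · rw [hbx]
      · have hxb : (x == b) = false := beq_eq_false_iff_ne.mpr (fun he => hbx he.symm)
        rw [List.idxOf_cons, hxb, cond_false] at h0
        omega
    · rw [List.find?_cons_of_neg (by simp [hx])]
      have hbx : b ≠ x := fun he => hx (he ▸ hbl)
      apply ih b hbl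
      · rcases List.mem_cons.mp hbpo with he | hm
        · exact absurd he hbx
        · exact hm
      · intro m hml hmpo
        have hmx : m ≠ x := fun he => hx (he ▸ hml)
        have hxb : (x == b) = false := beq_eq_false_iff_ne.mpr (fun he => hbx he.symm)
        have hxm : (x == m) = false := beq_eq_false_iff_ne.mpr (fun he => hmx he.symm)
        have := hmin m hml (List.mem_cons_of_mem _ hmpo)
        rw [List.idxOf_cons, List.idxOf_cons, hxb, hxm, cond_false, cond_false] at this
        omega

-- ===== VERDICT (by name: the statement is the Claim_ definition above) =====
theorem pick_by_precedence_py_spec : Claim_equal_pick_by_precedence_py := by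
  intro labels po _
  show pick_by_precedence_py labels po = pick_by_precedence_py_alt labels po
  have hg := foldB_good po labels [] none (by intro l h; cases h)
  rw [pickA_eq_find]
  show _ = Option.map Prod.fst (List.foldl (pickBStep (pickBRank po)) none labels)
  cases hres : labels.foldl (pickBStep (pickBRank po)) none with
  | none =>
    rw [hres] at hg
    rw [find_none labels po (by simpa using hg)]
    rfl
  | some p =>
    obtain ⟨b, r⟩ := p
    rw [hres] at hg
    obtain ⟨hb, hbpo, -, hmin⟩ := hg
    simp only [List.nil_append] at hb hmin
    rw [find_of_min labels po b hb hbpo hmin]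
    rfl
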